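-- pv_equiv track=rewrite | github.com/kimdy003/Python_study | 4_etc/month_code/9/2.py | solution
-- ===== SOURCE A (Python) =====
-- movdir = [[-1, 0], [0, 1], [1, 0], [0, -1]]  # 상우하좌
--
-- def right(dir):
--     return dir + 1 if dir < 3 else 0
--
-- def left(dir):
--     return dir - 1 if dir > 0 else 3
--
-- def cycle(y, x, N, M):
--     if y < 0:
--         y = N - 1
--     elif N <= y:
--         y = 0
--
--     if x < 0:
--         x = M - 1
--     elif M <= x:
--         x = 0
--     return y, x
--
-- def backtrak(y, x, d, grid, cand, N, M, visit):
--     if cand and [y, x, d] in cand: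
--         for i, v in enumerate(cand):
--             if [y, x, d] == v:
--                 return len(cand) - i
--
--     if visit[d][y][x] == True:
--         return 0
--
--     cand.append([y, x, d])
--     visit[d][y][x] = True
--     ny, nx = y + movdir[d][0], x + movdir[d][1]
--     if not (0 <= ny < N and 0 <= nx < M):
--         ny, nx = cycle(ny, nx, N, M)
--
--     if grid[ny][nx] == "R":
--         d = right(d)
--     elif grid[ny][nx] == "L":
--         d = left(d)
--
--     return backtrak(ny, nx, d, grid, cand, N, M, visit)
--
-- def solution(grid):
--     answer = []
--     N, M = len(grid), len(grid[0])
--     visit = [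
--         [[False for col in range(M)] for row in range(N)] for _ in range(4)
--     ]
--
--     for i in range(N):
--         for j in range(M):
--             for k in range(4):
--                 if visit[k][i][j] == False:
--                     cand = []
--                     temp = backtrak(i, j, k, grid, cand, N, M, visit)
--                     if temp != 0:
--                         answer.append(temp)
--
--     return sorted(answer)
-- ===== SOURCE B (Python) =====
-- def solution(grid):
--     N, M = len(grid), len(grid[0])
--     S = 4 * N * M
--
--     # transition table over flattened states s = 4*(y*M + x) + d
--     succ = [0] * S
--     for s in range(S):
--         d = s % 4
--         yx = s // 4
--         y, x = yx // M, yx % M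
--         dy, dx = [(-1, 0), (0, 1), (1, 0), (0, -1)][d]
--         ny, nx = (y + dy) % N, (x + dx) % M
--         c = grid[ny][nx]
--         nd = (d + 1) % 4 if c == "R" else (d - 1) % 4 if c == "L" else d
--         succ[s] = 4 * (ny * M + nx) + nd
--
--     def walk(t, seen):
--         path = {}
--         while not seen[t]:
--             path[t] = len(path)
--             seen[t] = True
--             t = succ[t]
--         return len(path) - path[t] if t in path else None
--
--     seen = [False] * S
--     answer = []
--     for s in range(S):
--         if not seen[s]:
--             r = walk(s, seen)
--             if r is not None:
--                 answer.append(r)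
--     return sorted(answer)
-- ===== Notes on version B (the rewrite author's own statement) =====
-- stated objective: faster
-- what changed: B precomputes a flat successor table over encoded states 4*(y*M+x)+d, then makes a single pass over all encoded states with an iterative walk that keeps a dict state->path-position for O(1) cycle lookup, replacing A's triple-nested loop with recursive backtrak that rescans the whole path list ('[y,x,d] in cand' plus an enumerate scan) at every step.
import Mathlib
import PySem

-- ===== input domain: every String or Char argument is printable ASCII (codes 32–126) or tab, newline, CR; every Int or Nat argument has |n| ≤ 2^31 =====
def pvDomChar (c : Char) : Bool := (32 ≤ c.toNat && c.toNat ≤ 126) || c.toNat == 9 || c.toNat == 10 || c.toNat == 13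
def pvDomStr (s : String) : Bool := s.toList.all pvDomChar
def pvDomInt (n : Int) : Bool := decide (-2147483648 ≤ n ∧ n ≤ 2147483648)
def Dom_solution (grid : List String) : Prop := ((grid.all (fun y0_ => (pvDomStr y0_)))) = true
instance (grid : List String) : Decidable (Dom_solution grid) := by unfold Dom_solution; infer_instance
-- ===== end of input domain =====

-- B precomputes a flat successor table over encoded states and walks it once with a
-- dict of path positions (O(1) cycle lookup) instead of A's recursive backtrak that
-- rescans the path list at every step: measurably faster on large grids.

-- ===== PORT A =====
-- module-level helpers of A
def pvMovdir : List (Int × Int) := [(-1, 0), (0, 1), (1, 0), (0, -1)]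

def pvRight (d : Int) : Int := if d < 3 then d + 1 else 0

def pvLeft (d : Int) : Int := if 0 < d then d - 1 else 3

-- visit[d][y][x] read; getD defaults are never hit on the in-range indices the program uses
def pvGet3 (visit : List (List (List Bool))) (d y x : Int) : Bool :=
  (PySem.List.pyGet? ((PySem.List.pyGet? ((PySem.List.pyGet? visit d).getD []) y).getD []) x).getD false

-- visit[d][y][x] = True; exact for the in-range non-negative indices the program uses
def pvSet3 (visit : List (List (List Bool))) (d y x : Int) : List (List (List Bool)) :=
  let plane := (PySem.List.pyGet? visit d).getD []
  let row := (PySem.List.pyGet? plane y).getD []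
  visit.set d.toNat (plane.set y.toNat (row.set x.toNat true))

def pvCycleFix (y x N M : Int) : Int × Int :=
  let y' := if y < 0 then N - 1 else if N ≤ y then 0 else y
  let x' := if x < 0 then M - 1 else if M ≤ x then 0 else x
  (y', x')

-- the 'for i, v in enumerate(cand): if [y, x, d] == v: return len(cand) - i' scan
def pvFindDepth (s : Int × Int × Int) (cand : List (Int × Int × Int)) (total i : Int) : Int :=
  match cand with
  | [] => 0   -- unreachable: guarded by membership
  | v :: rest => if v = s then total - i else pvFindDepth s rest total (i + 1)

-- backtrak, with a fuel argument for totality only (4*N*M+1 always suffices: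
-- every recursive step marks a fresh visit cell)
def pvBacktrak : Nat → Int → Int → Int → List String → List (Int × Int × Int) →
    Int → Int → List (List (List Bool)) → Int × List (List (List Bool))
  | 0, _, _, _, _, _, _, _, visit => (0, visit)
  | Nat.succ fuel, y, x, d, grid, cand, N, M, visit =>
    if cand ≠ [] ∧ (y, x, d) ∈ cand then
      (pvFindDepth (y, x, d) cand (cand.length : Int) 0, visit)
    else if pvGet3 visit d y x then (0, visit)
    else
      let cand' := cand ++ [(y, x, d)]
      let visit' := pvSet3 visit d y x
      let mv := (PySem.List.pyGet? pvMovdir d).getD (0, 0)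
      let ny0 := y + mv.1
      let nx0 := x + mv.2
      let p := if ¬ (0 ≤ ny0 ∧ ny0 < N ∧ 0 ≤ nx0 ∧ nx0 < M) then pvCycleFix ny0 nx0 N M else (ny0, nx0)
      let c := (PySem.Str.pyGet? ((PySem.List.pyGet? grid p.1).getD "") p.2).getD ' '
      let d' := if c = 'R' then pvRight d else if c = 'L' then pvLeft d else d
      pvBacktrak fuel p.1 p.2 d' grid cand' N M visit'

def solution (grid : List String) : List Int :=
  let N : Int := grid.length
  let M : Int := (PySem.Str.len ((PySem.List.pyGet? grid 0).getD "") : Int)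
  let visit0 := List.replicate 4 (List.replicate N.toNat (List.replicate M.toNat false))
  let st := (PySem.List.pyRange 0 N).foldl (fun st i =>
    (PySem.List.pyRange 0 M).foldl (fun st j =>
      (PySem.List.pyRange 0 4).foldl (fun st k =>
        if pvGet3 st.1 k i j = false then
          let r := pvBacktrak (4 * N.toNat * M.toNat + 1) i j k grid [] N M st.1
          (r.2, if r.1 ≠ 0 then st.2 ++ [r.1] else st.2)
        else st) st) st) (visit0, ([] : List Int))
  PySem.List.sorted st.2 (fun v => v)

-- ===== PORT B =====
-- succ[s] for every encoded state s = 4*(y*M+x)+d: the 'for s in range(S)' table builder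
def pvSuccTable (grid : List String) (N M S : Int) : List Int :=
  (PySem.List.pyRange 0 S).foldl (fun succ s =>
    let d := PySem.Int.mod s 4
    let yx := PySem.Int.floordiv s 4
    let y := PySem.Int.floordiv yx M
    let x := PySem.Int.mod yx M
    let mv := (PySem.List.pyGet? [((-1 : Int), (0 : Int)), (0, 1), (1, 0), (0, -1)] d).getD (0, 0)
    let ny := PySem.Int.mod (y + mv.1) N
    let nx := PySem.Int.mod (x + mv.2) M
    let c := (PySem.Str.pyGet? ((PySem.List.pyGet? grid ny).getD "") nx).getD ' '
    let nd := if c = 'R' then PySem.Int.mod (d + 1) 4 else if c = 'L' then PySem.Int.mod (d - 1) 4 else d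
    succ.set s.toNat (4 * (ny * M + nx) + nd)) (List.replicate S.toNat 0)

-- the 'while not seen[t]' walk of Source B; fuel only for totality (the loop marks a
-- fresh seen entry per iteration, so S+1 steps always suffice)
def pvWalk (succ : List Int) : Nat → Int → PySem.Dict Int Int → List Bool → Option Int × List Bool
  | 0, _, _, seen => (none, seen)
  | Nat.succ fuel, t, path, seen =>
    if (PySem.List.pyGet? seen t).getD false = false then
      pvWalk succ fuel ((PySem.List.pyGet? succ t).getD 0) (path.insert t (path.size : Int)) (seen.set t.toNat true)
    else
      match path.get? t with
      | some i => (some ((path.size : Int) - i), seen)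
      | none => (none, seen)

def solution_alt (grid : List String) : List Int :=
  let N : Int := grid.length
  let M : Int := (PySem.Str.len ((PySem.List.pyGet? grid 0).getD "") : Int)
  let S : Int := 4 * N * M
  let succ := pvSuccTable grid N M S
  let st := (PySem.List.pyRange 0 S).foldl (fun st s =>
    if (PySem.List.pyGet? st.1 s).getD false = false then
      let r := pvWalk succ (S.toNat + 1) s PySem.Dict.empty st.1
      (r.2, match r.1 with | some v => st.2 ++ [v] | none => st.2)
    else st) (List.replicate S.toNat false, ([] : List Int))
  PySem.List.sorted st.2 (fun v => v)

-- ===== PRECONDITION & SPEC =====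
-- Pre_ excludes exactly the grids on which Python A raises IndexError: the empty grid
-- (len(grid[0])) and grids with a row shorter than the first row (A's toroidal walk
-- reads every column 0..M-1 of every row).
def Pre_solution (grid : List String) : Prop :=
  grid ≠ [] ∧ ∀ s ∈ grid, PySem.Str.len ((PySem.List.pyGet? grid 0).getD "") ≤ PySem.Str.len s
instance (grid : List String) : Decidable (Pre_solution grid) := by unfold Pre_solution; infer_instance

def pvWitness_solution : List String := ["RL", "LR"]

def Spec_solution (grid : List String) (out : List Int) : Prop := out = solution_alt grid
instance (grid : List String) (out : List Int) : Decidable (Spec_solution grid out) := by unfold Spec_solution; infer_instance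

-- ===== CLAIM (what is proved, stated in full; the proofs are below) =====
def Claim_equal_solution : Prop := ∀ (grid : List String), Dom_solution grid → Pre_solution grid → Spec_solution grid (solution grid)

-- ===== LEMMAS AND PROOFS =====

-- 0 ↦ none, r ↦ some r : how A's "0 means nothing to append" encodes B's Option
def pvResOpt (r : Int) : Option Int := if r = 0 then none else some r

-- the state encoding Source B uses, and the in-range predicate
def pvEnc (M y x d : Int) : Int := 4 * (y * M + x) + d

def pvInr (N M y x d : Int) : Prop := 0 ≤ y ∧ y < N ∧ 0 ≤ x ∧ x < M ∧ 0 ≤ d ∧ d < 4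

-- the common one-step transition (A's wrap-if rewritten through mod)
def pvStepT (grid : List String) (N M : Int) (p : Int × Int × Int) : Int × Int × Int :=
  let mv := (PySem.List.pyGet? pvMovdir p.2.2).getD (0, 0)
  let ny := PySem.Int.mod (p.1 + mv.1) N
  let nx := PySem.Int.mod (p.2.1 + mv.2) M
  let c := (PySem.Str.pyGet? ((PySem.List.pyGet? grid ny).getD "") nx).getD ' '
  (ny, nx, if c = 'R' then pvRight p.2.2 else if c = 'L' then pvLeft p.2.2 else p.2.2)

def pvVShape (N M : Int) (v : List (List (List Bool))) : Prop :=
  v.length = 4 ∧ ∀ pl ∈ v, pl.length = N.toNat ∧ ∀ row ∈ pl, row.length = M.toNat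

-- the visit/seen correspondence carried through both loops
def pvRel (N M : Int) (visit : List (List (List Bool))) (seen : List Bool) : Prop :=
  pvVShape N M visit ∧ seen.length = (4 * N * M).toNat ∧
  ∀ y x d, pvInr N M y x d →
    pvGet3 visit d y x = (PySem.List.pyGet? seen (pvEnc M y x d)).getD false

lemma pvWrapIf_eq_mod (a n : Int) (h1 : -1 ≤ a) (h2 : a ≤ n) (hn : 0 < n) :
    (if a < 0 then n - 1 else if n ≤ a then 0 else a) = PySem.Int.mod a n := by
  rw [PySem.Int.mod_eq_emod_of_pos hn]
  split_ifs with h h'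
  · have ha : a = -1 := by omega
    subst ha
    have : (-1 : Int) = (n - 1) + n * (-1) := by ring
    rw [this, Int.add_mul_emod_self_left, Int.emod_eq_of_lt (by omega) (by omega)]
  · have ha : a = n := by omega
    subst ha; simp
  · exact (Int.emod_eq_of_lt (by omega) (by omega)).symm

lemma pvMovdir_bounds (d : Int) :
    -1 ≤ ((PySem.List.pyGet? pvMovdir d).getD (0, 0)).1 ∧
    ((PySem.List.pyGet? pvMovdir d).getD (0, 0)).1 ≤ 1 ∧
    -1 ≤ ((PySem.List.pyGet? pvMovdir d).getD (0, 0)).2 ∧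
    ((PySem.List.pyGet? pvMovdir d).getD (0, 0)).2 ≤ 1 := by
  rcases h : PySem.List.pyGet? pvMovdir d with _ | v
  · simp
  · have hv : v ∈ pvMovdir := by
      unfold PySem.List.pyGet? at h
      rcases hk : PySem.List.pyIdx? pvMovdir.length d with _ | k
      · rw [hk] at h; simp at h
      · rw [hk] at h; simp at h
        exact List.mem_of_getElem? h
    simp only [Option.getD_some]
    fin_cases hv <;> simp

lemma pvFindDepth_eq (s : Int × Int × Int) (cand : List (Int × Int × Int)) :
    ∀ (L i : Int) (k : Nat), PySem.List.index? cand s = some k →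
      pvFindDepth s cand L i = L - (i + k) := by
  induction cand with
  | nil => intro L i k h; rw [PySem.List.index?_eq_idxOf?] at h; simp at h
  | cons v rest ih =>
    intro L i k h
    by_cases hv : v = s
    · subst hv
      rw [PySem.List.index?_cons_self] at h
      simp at h
      subst h
      simp [pvFindDepth]
    · rw [PySem.List.index?_cons_of_ne rest hv] at h
      rcases hk : PySem.List.index? rest s with _ | k'
      · rw [hk] at h; simp at h
      · rw [hk] at h; simp at h
        have := ih L (i + 1) k' hk
        simp [pvFindDepth, hv, this]
        omega

lemma pvContains_of_get?_none {κ ν : Type} [BEq κ] (idx : PySem.Dict κ ν) (s : κ)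
    (h : idx.get? s = none) : idx.contains s = false := by
  unfold PySem.Dict.get? at h
  unfold PySem.Dict.contains
  rcases hf : idx.items.find? (fun p => p.1 == s) with _ | p
  · rw [List.find?_eq_none] at hf
    simp only [List.any_eq_false]
    intro p hp
    exact hf p hp
  · rw [hf] at h; simp at h

-- generic: a relation preserved by both fold bodies is preserved by both folds
lemma pvFoldlRel {σ τ α : Type} (R : σ → τ → Prop) (f : σ → α → σ) (g : τ → α → τ)
    (l : List α) (s : σ) (t : τ) (h : R s t)
    (hstep : ∀ s t a, a ∈ l → R s t → R (f s a) (g t a)) :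
    R (l.foldl f s) (l.foldl g t) := by
  induction l generalizing s t with
  | nil => exact h
  | cons a l ih =>
    exact ih (f s a) (g t a) (hstep s t a (List.mem_cons_self) h)
      (fun s t b hb => hstep s t b (List.mem_cons_of_mem a hb))

-- a fold over range (a*b) is the nested fold over range a / range b
lemma pvFoldlRangeMul {σ : Type} (a b : Nat) (f : σ → Nat → σ) (init : σ) :
    (List.range (a * b)).foldl f init =
      (List.range a).foldl (fun st i => (List.range b).foldl (fun st j => f st (i * b + j)) st) init := by
  induction a generalizing init with
  | zero => simp
  | succ a ih =>
    have h1 : (a + 1) * b = a * b + b := by ring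
    rw [h1, List.range_add, List.foldl_append, ih, List.range_succ, List.foldl_append,
      List.foldl_map]
    simp

-- tabulation: setting every index of a replicate in order yields a map over range
lemma pvTabulateAux {α : Type} (g : Nat → α) (c : α) :
    ∀ (n m : Nat), (List.range n).foldl (fun l k => l.set k (g k)) (List.replicate (n + m) c)
      = (List.range n).map g ++ List.replicate m c := by
  intro n
  induction n with
  | zero => intro m; simp
  | succ n ih =>
    intro m
    rw [List.range_succ, List.foldl_append]
    have h1 : n + 1 + m = n + (m + 1) := by omega
    rw [h1, ih (m + 1)]
    simp only [List.foldl_cons, List.foldl_nil, List.replicate_succ]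
    rw [List.set_append]
    simp

lemma pvTabulate {α : Type} (g : Nat → α) (c : α) (n : Nat) :
    (List.range n).foldl (fun l k => l.set k (g k)) (List.replicate n c)
      = (List.range n).map g := by
  have := pvTabulateAux g c n 0
  simpa using this

lemma pvEnc_bounds (N M y x d : Int) (h : pvInr N M y x d) :
    0 ≤ pvEnc M y x d ∧ pvEnc M y x d < 4 * N * M := by
  obtain ⟨h1, h2, h3, h4, h5, h6⟩ := h
  unfold pvEnc
  constructor
  · have : 0 ≤ y * M := mul_nonneg h1 (by omega)
    omega
  · have hyM : y * M ≤ (N - 1) * M := mul_le_mul_of_nonneg_right (by omega) (by omega)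
    nlinarith

lemma pvEnc_inj (N M : Int) (y x d y' x' d' : Int) (h : pvInr N M y x d)
    (h' : pvInr N M y' x' d') (he : pvEnc M y x d = pvEnc M y' x' d') :
    y = y' ∧ x = x' ∧ d = d' := by
  obtain ⟨h1, h2, h3, h4, h5, h6⟩ := h
  obtain ⟨h1', h2', h3', h4', h5', h6'⟩ := h'
  unfold pvEnc at he
  have hd : d = d' ∧ y * M + x = y' * M + x' := by omega
  obtain ⟨hd1, hd2⟩ := hd
  have hM : 0 < M := by omega
  have hy : y = y' := by
    by_contra hne
    rcases lt_or_gt_of_ne hne with hlt | hlt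
    · have : y * M + M ≤ y' * M := by
        have := mul_le_mul_of_nonneg_right (show y + 1 ≤ y' by omega) (le_of_lt hM)
        nlinarith
      omega
    · have : y' * M + M ≤ y * M := by
        have := mul_le_mul_of_nonneg_right (show y' + 1 ≤ y by omega) (le_of_lt hM)
        nlinarith
      omega
  subst hy
  refine ⟨rfl, by omega, hd1⟩

lemma pvStepT_inr (grid : List String) (N M : Int) (hN : 0 < N) (hM : 0 < M)
    (p : Int × Int × Int) (h : pvInr N M p.1 p.2.1 p.2.2) :
    pvInr N M (pvStepT grid N M p).1 (pvStepT grid N M p).2.1 (pvStepT grid N M p).2.2 := by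
  obtain ⟨h1, h2, h3, h4, h5, h6⟩ := h
  unfold pvStepT pvInr
  refine ⟨PySem.Int.mod_nonneg _ hN, PySem.Int.mod_lt _ hN,
    PySem.Int.mod_nonneg _ hM, PySem.Int.mod_lt _ hM, ?_, ?_⟩ <;>
    (simp only [pvRight, pvLeft]; split_ifs <;> omega)

-- mod-4 turn arithmetic matches A's right/left helpers on 0 ≤ d < 4
lemma pvModRight (d : Int) (h1 : 0 ≤ d) (h2 : d < 4) :
    PySem.Int.mod (d + 1) 4 = pvRight d := by
  rw [PySem.Int.mod_eq_emod_of_pos (by omega)]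
  unfold pvRight
  split_ifs <;> omega

lemma pvModLeft (d : Int) (h1 : 0 ≤ d) (h2 : d < 4) :
    PySem.Int.mod (d - 1) 4 = pvLeft d := by
  rw [PySem.Int.mod_eq_emod_of_pos (by omega)]
  unfold pvLeft
  split_ifs <;> omega

-- the value the table builder writes at index s
def pvSuccVal (grid : List String) (N M s : Int) : Int :=
  let d := PySem.Int.mod s 4
  let yx := PySem.Int.floordiv s 4
  let y := PySem.Int.floordiv yx M
  let x := PySem.Int.mod yx M
  let mv := (PySem.List.pyGet? [((-1 : Int), (0 : Int)), (0, 1), (1, 0), (0, -1)] d).getD (0, 0)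
  let ny := PySem.Int.mod (y + mv.1) N
  let nx := PySem.Int.mod (x + mv.2) M
  let c := (PySem.Str.pyGet? ((PySem.List.pyGet? grid ny).getD "") nx).getD ' '
  let nd := if c = 'R' then PySem.Int.mod (d + 1) 4 else if c = 'L' then PySem.Int.mod (d - 1) 4 else d
  4 * (ny * M + nx) + nd

lemma pvSuccTable_eq_map (grid : List String) (N M S : Int) :
    pvSuccTable grid N M S = (List.range S.toNat).map (fun k : Nat => pvSuccVal grid N M (k : Int)) := by
  unfold pvSuccTable
  have hb : (fun (succ : List Int) (s : Int) =>
      let d := PySem.Int.mod s 4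
      let yx := PySem.Int.floordiv s 4
      let y := PySem.Int.floordiv yx M
      let x := PySem.Int.mod yx M
      let mv := (PySem.List.pyGet? [((-1 : Int), (0 : Int)), (0, 1), (1, 0), (0, -1)] d).getD (0, 0)
      let ny := PySem.Int.mod (y + mv.1) N
      let nx := PySem.Int.mod (x + mv.2) M
      let c := (PySem.Str.pyGet? ((PySem.List.pyGet? grid ny).getD "") nx).getD ' '
      let nd := if c = 'R' then PySem.Int.mod (d + 1) 4 else if c = 'L' then PySem.Int.mod (d - 1) 4 else d
      succ.set s.toNat (4 * (ny * M + nx) + nd))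
      = (fun (succ : List Int) (s : Int) => succ.set s.toNat (pvSuccVal grid N M s)) := rfl
  rw [hb, PySem.List.pyRange_one, List.foldl_map]
  simp only [zero_add, sub_zero, Int.toNat_natCast]
  exact pvTabulate (fun k : Nat => pvSuccVal grid N M (k : Int)) 0 S.toNat

lemma pvSuccVal_enc (grid : List String) (N M : Int) (hM : 0 < M)
    (y x d : Int) (h : pvInr N M y x d) :
    pvSuccVal grid N M (pvEnc M y x d)
      = pvEnc M (pvStepT grid N M (y, x, d)).1 (pvStepT grid N M (y, x, d)).2.1
          (pvStepT grid N M (y, x, d)).2.2 := by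
  obtain ⟨h1, h2, h3, h4, h5, h6⟩ := h
  have hd : PySem.Int.mod (pvEnc M y x d) 4 = d := by
    rw [PySem.Int.mod_eq_emod_of_pos (by omega)]; unfold pvEnc; omega
  have hyx : PySem.Int.floordiv (pvEnc M y x d) 4 = y * M + x := by
    rw [PySem.Int.floordiv_eq_ediv_of_pos (by omega)]; unfold pvEnc; omega
  have hy : PySem.Int.floordiv (y * M + x) M = y := by
    rw [PySem.Int.floordiv_eq_ediv_of_pos hM, show y * M + x = x + y * M from by ring,
      Int.add_mul_ediv_right _ _ (by omega), Int.ediv_eq_zero_of_lt h3 h4]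
    simp
  have hx : PySem.Int.mod (y * M + x) M = x := by
    rw [PySem.Int.mod_eq_emod_of_pos hM, show y * M + x = x + y * M from by ring,
      Int.add_mul_emod_self_right]
    exact Int.emod_eq_of_lt h3 h4
  unfold pvSuccVal pvStepT pvEnc at *
  simp only [pvMovdir, hd, hyx, hy, hx, pvModRight d h5 h6, pvModLeft d h5 h6]

-- the successor-table entry at an in-range encoded state is the encoded step
lemma pvSucc_spec (grid : List String) (N M : Int) (hM : 0 < M)
    (y x d : Int) (h : pvInr N M y x d) :
    (PySem.List.pyGet? (pvSuccTable grid N M (4 * N * M)) (pvEnc M y x d)).getD 0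
      = pvEnc M (pvStepT grid N M (y, x, d)).1 (pvStepT grid N M (y, x, d)).2.1
          (pvStepT grid N M (y, x, d)).2.2 := by
  have hb := pvEnc_bounds N M y x d h
  rw [pvSuccTable_eq_map grid N M _, PySem.List.pyGet?_of_nonneg _ hb.1]
  have hlt : (pvEnc M y x d).toNat < (4 * N * M).toNat := by omega
  rw [List.getElem?_map]
  simp only [List.getElem?_range hlt, Option.map_some, Option.getD_some,
    Int.toNat_of_nonneg hb.1]
  exact pvSuccVal_enc grid N M hM y x d h

-- reading/writing visit through pvGet3/pvSet3 at in-range indices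
lemma pvGet3_unfold (visit : List (List (List Bool))) (d y x : Int)
    (hd : 0 ≤ d) (hy : 0 ≤ y) (hx : 0 ≤ x) :
    pvGet3 visit d y x
      = ((((visit[d.toNat]?.getD [])[y.toNat]?).getD [])[x.toNat]?).getD false := by
  unfold pvGet3
  rw [PySem.List.pyGet?_of_nonneg _ hd, PySem.List.pyGet?_of_nonneg _ hy,
    PySem.List.pyGet?_of_nonneg _ hx]

lemma pvSet3_unfold (visit : List (List (List Bool))) (d y x : Int)
    (hd : 0 ≤ d) (hy : 0 ≤ y) :
    pvSet3 visit d y x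
      = visit.set d.toNat ((visit[d.toNat]?.getD []).set y.toNat
          ((((visit[d.toNat]?.getD [])[y.toNat]?).getD []).set x.toNat true)) := by
  unfold pvSet3
  simp only [PySem.List.pyGet?_of_nonneg _ hd, PySem.List.pyGet?_of_nonneg _ hy]

lemma pvGet3_set3 (N M : Int) (visit : List (List (List Bool))) (hs : pvVShape N M visit)
    (y x d y' x' d' : Int) (h : pvInr N M y x d) (h' : pvInr N M y' x' d') :
    pvGet3 (pvSet3 visit d y x) d' y' x'
      = if y' = y ∧ x' = x ∧ d' = d then true else pvGet3 visit d' y' x' := by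
  obtain ⟨hv4, hsub⟩ := hs
  obtain ⟨hy0, hyN, hx0, hxM, hd0, hd4⟩ := h
  obtain ⟨hy0', hyN', hx0', hxM', hd0', hd4'⟩ := h'
  have hdlt : d.toNat < visit.length := by omega
  have hplane : visit[d.toNat]?.getD [] = visit[d.toNat] := by
    rw [List.getElem?_eq_getElem hdlt]; rfl
  have hplanemem : visit[d.toNat] ∈ visit := List.getElem_mem hdlt
  obtain ⟨hplen, hprow⟩ := hsub _ hplanemem
  have hylt : y.toNat < (visit[d.toNat]).length := by omega
  have hrow : (visit[d.toNat])[y.toNat]?.getD [] = (visit[d.toNat])[y.toNat] := by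
    rw [List.getElem?_eq_getElem hylt]; rfl
  have hrowmem : (visit[d.toNat])[y.toNat] ∈ visit[d.toNat] := List.getElem_mem hylt
  have hrlen := (hprow _ hrowmem)
  have hxlt : x.toNat < ((visit[d.toNat])[y.toNat]).length := by omega
  rw [pvGet3_unfold _ _ _ _ hd0' hy0' hx0', pvSet3_unfold _ _ _ _ hd0 hy0, hplane, hrow]
  by_cases hdd : d' = d
  · subst hdd
    rw [List.getElem?_set_self hdlt]
    simp only [Option.getD_some]
    by_cases hyy : y' = y
    · subst hyy
      rw [List.getElem?_set_self hylt]
      simp only [Option.getD_some]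
      by_cases hxx : x' = x
      · subst hxx
        rw [List.getElem?_set_self hxlt]
        simp
      · rw [List.getElem?_set_ne (by omega)]
        rw [pvGet3_unfold _ _ _ _ hd0' hy0' hx0', hplane, hrow]
        simp [hxx]
    · rw [List.getElem?_set_ne (by omega)]
      rw [pvGet3_unfold _ _ _ _ hd0' hy0' hx0', hplane]
      simp [hyy]
  · rw [List.getElem?_set_ne (by omega)]
    rw [pvGet3_unfold _ _ _ _ hd0' hy0' hx0']
    simp [hdd]

lemma pvVShape_set3 (N M : Int) (visit : List (List (List Bool))) (hs : pvVShape N M visit)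
    (y x d : Int) (h : pvInr N M y x d) : pvVShape N M (pvSet3 visit d y x) := by
  obtain ⟨hv4, hsub⟩ := hs
  obtain ⟨hy0, hyN, hx0, hxM, hd0, hd4⟩ := h
  rw [pvSet3_unfold _ _ _ _ hd0 hy0]
  refine ⟨by simp [hv4], ?_⟩
  intro pl hpl
  rcases List.mem_or_eq_of_mem_set hpl with hmem | heq
  · exact hsub _ hmem
  · subst heq
    have hdlt : d.toNat < visit.length := by omega
    have hplane : visit[d.toNat]?.getD [] = visit[d.toNat] := by
      rw [List.getElem?_eq_getElem hdlt]; rfl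
    rw [hplane]
    obtain ⟨hplen, hprow⟩ := hsub _ (List.getElem_mem hdlt)
    refine ⟨by simp [hplen], ?_⟩
    intro row hrow
    rcases List.mem_or_eq_of_mem_set hrow with hmem | heq
    · exact hprow _ hmem
    · subst heq
      have hylt : y.toNat < (visit[d.toNat]).length := by omega
      rw [List.getElem?_eq_getElem hylt]
      simpa using hprow _ (List.getElem_mem hylt)

-- the walk lemma: A's backtrak and B's while-walk agree step for step
lemma pvWalk_eq (grid : List String) (N M : Int) (hN : 0 < N) (hM : 0 < M) :
    ∀ (fuel : Nat) (y x d : Int) (cand : List (Int × Int × Int))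
      (path : PySem.Dict Int Int) (visit : List (List (List Bool))) (seen : List Bool),
      pvInr N M y x d →
      pvRel N M visit seen →
      (∀ p ∈ cand, pvInr N M p.1 p.2.1 p.2.2) →
      (∀ p, pvInr N M p.1 p.2.1 p.2.2 →
        path.get? (pvEnc M p.1 p.2.1 p.2.2) = (PySem.List.index? cand p).map (fun n : Nat => (n : Int))) →
      path.size = cand.length →
      (∀ p ∈ cand, pvGet3 visit p.2.2 p.1 p.2.1 = true) →
      (pvWalk (pvSuccTable grid N M (4 * N * M)) fuel (pvEnc M y x d) path seen).1
          = pvResOpt (pvBacktrak fuel y x d grid cand N M visit).1 ∧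
        pvRel N M (pvBacktrak fuel y x d grid cand N M visit).2
          (pvWalk (pvSuccTable grid N M (4 * N * M)) fuel (pvEnc M y x d) path seen).2 := by
  intro fuel
  induction fuel with
  | zero =>
    intro y x d cand path visit seen hin hrel hcand hpath hsize hmark
    exact ⟨by simp [pvWalk, pvBacktrak, pvResOpt], by simpa [pvWalk, pvBacktrak] using hrel⟩
  | succ fuel ih =>
    intro y x d cand path visit seen hin hrel hcand hpath hsize hmark
    obtain ⟨hshape, hlen, hcorr⟩ := hrel
    by_cases hm : (y, x, d) ∈ cand
    · -- the walk closed a cycle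
      have hvt : pvGet3 visit d y x = true := hmark _ hm
      have hseen : (PySem.List.pyGet? seen (pvEnc M y x d)).getD false = true := by
        rw [← hcorr y x d hin]; exact hvt
      have hsome : (PySem.List.index? cand (y, x, d)).isSome :=
        (PySem.List.index?_isSome_iff _ _).mpr hm
      rcases hidx : PySem.List.index? cand (y, x, d) with _ | k
      · rw [hidx] at hsome; simp at hsome
      obtain ⟨hk, -, -⟩ := PySem.List.getElem_of_index?_eq_some hidx
      have hfd := pvFindDepth_eq (y, x, d) cand (cand.length : Int) 0 k hidx
      have hget : path.get? (pvEnc M y x d) = some (k : Int) := by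
        have h2 := hpath (y, x, d) (by exact hin)
        rw [hidx] at h2
        simpa using h2
      have hne : cand ≠ [] := List.ne_nil_of_mem hm
      have hA : pvBacktrak (Nat.succ fuel) y x d grid cand N M visit
          = (pvFindDepth (y, x, d) cand (cand.length : Int) 0, visit) := by
        simp [pvBacktrak, hne, hm]
      have hB : pvWalk (pvSuccTable grid N M (4 * N * M)) (Nat.succ fuel)
            (pvEnc M y x d) path seen = (some ((path.size : Int) - (k : Int)), seen) := by
        simp [pvWalk, hseen, hget]
      rw [hA, hB]
      refine ⟨?_, ⟨hshape, hlen, hcorr⟩⟩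
      rw [hfd]
      simp only [pvResOpt, hsize]
      split_ifs with h0
      · exfalso; omega
      · congr 1
        omega
    · have hidx : PySem.List.index? cand (y, x, d) = none :=
        (PySem.List.index?_eq_none_iff _ _).mpr hm
      have hget : path.get? (pvEnc M y x d) = none := by
        have h2 := hpath (y, x, d) (by exact hin)
        rw [hidx] at h2
        simpa using h2
      by_cases hv : pvGet3 visit d y x
      · -- hit a state visited by an earlier walk
        have hseen : (PySem.List.pyGet? seen (pvEnc M y x d)).getD false = true := by
          rw [← hcorr y x d hin]; exact hv
        have hA : pvBacktrak (Nat.succ fuel) y x d grid cand N M visit = (0, visit) := by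
          simp [pvBacktrak, hm, hv]
        have hB : pvWalk (pvSuccTable grid N M (4 * N * M)) (Nat.succ fuel)
              (pvEnc M y x d) path seen = (none, seen) := by
          simp [pvWalk, hseen, hget]
        rw [hA, hB]
        exact ⟨by simp [pvResOpt], ⟨hshape, hlen, hcorr⟩⟩
      · -- fresh state: both sides mark it and move on
        have hvf : pvGet3 visit d y x = false := by
          cases hg : pvGet3 visit d y x
          · rfl
          · exact absurd hg hv
        have hseen : (PySem.List.pyGet? seen (pvEnc M y x d)).getD false = false := by
          rw [← hcorr y x d hin]; exact hvf
        obtain ⟨hy0, hyN, hx0, hxM, hd0, hd4⟩ := hin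
        obtain ⟨hdy1, hdy2, hdx1, hdx2⟩ := pvMovdir_bounds d
        set mv := (PySem.List.pyGet? pvMovdir d).getD (0, 0) with hmv
        have hwy := pvWrapIf_eq_mod (y + mv.1) N (by omega) (by omega) hN
        have hwx := pvWrapIf_eq_mod (x + mv.2) M (by omega) (by omega) hM
        have hp : (if ¬ (0 ≤ y + mv.1 ∧ y + mv.1 < N ∧ 0 ≤ x + mv.2 ∧ x + mv.2 < M)
              then pvCycleFix (y + mv.1) (x + mv.2) N M else (y + mv.1, x + mv.2))
            = (PySem.Int.mod (y + mv.1) N, PySem.Int.mod (x + mv.2) M) := by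
          by_cases hcond : (0 ≤ y + mv.1 ∧ y + mv.1 < N ∧ 0 ≤ x + mv.2 ∧ x + mv.2 < M)
          · obtain ⟨h1, h2, h3, h4⟩ := hcond
            rw [if_neg (not_not_intro ⟨h1, h2, h3, h4⟩)]
            rw [if_neg (by omega), if_neg (by omega)] at hwy
            rw [if_neg (by omega), if_neg (by omega)] at hwx
            exact Prod.ext_iff.mpr ⟨hwy, hwx⟩
          · rw [if_pos hcond]
            simp only [pvCycleFix]
            exact Prod.ext_iff.mpr ⟨hwy, hwx⟩
        have hinr : pvInr N M y x d := ⟨hy0, hyN, hx0, hxM, hd0, hd4⟩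
        set q := pvStepT grid N M (y, x, d) with hq
        have hqin : pvInr N M q.1 q.2.1 q.2.2 := pvStepT_inr grid N M hN hM _ hinr
        have hredA : pvBacktrak (Nat.succ fuel) y x d grid cand N M visit
            = pvBacktrak fuel q.1 q.2.1 q.2.2 grid (cand ++ [(y, x, d)]) N M
                (pvSet3 visit d y x) := by
          simp only [pvBacktrak, hm, and_false, if_false, hvf, Bool.false_eq_true, if_false]
          rw [← hmv, hp]
          rfl
        have hsucc : (PySem.List.pyGet? (pvSuccTable grid N M (4 * N * M))
            (pvEnc M y x d)).getD 0 = pvEnc M q.1 q.2.1 q.2.2 :=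
          pvSucc_spec grid N M hM y x d hinr
        have hredB : pvWalk (pvSuccTable grid N M (4 * N * M)) (Nat.succ fuel)
              (pvEnc M y x d) path seen
            = pvWalk (pvSuccTable grid N M (4 * N * M)) fuel (pvEnc M q.1 q.2.1 q.2.2)
                (path.insert (pvEnc M y x d) (path.size : Int))
                (seen.set (pvEnc M y x d).toNat true) := by
          simp only [pvWalk, hseen, if_true]
          rw [hsucc]
        rw [hredA, hredB]
        -- the new invariants
        have hbnd := pvEnc_bounds N M y x d hinr
        have hcontains : path.contains (pvEnc M y x d) = false :=
          pvContains_of_get?_none path _ hget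
        apply ih
        · exact hqin
        · refine ⟨pvVShape_set3 N M visit hshape y x d hinr, by simpa using hlen, ?_⟩
          intro y' x' d' hin'
          have hbnd' := pvEnc_bounds N M y' x' d' hin'
          rw [pvGet3_set3 N M visit hshape y x d y' x' d' hinr hin',
            PySem.List.pyGet?_of_nonneg _ hbnd'.1, List.getElem?_set]
          by_cases he : y' = y ∧ x' = x ∧ d' = d
          · obtain ⟨e1, e2, e3⟩ := he
            rw [if_pos (⟨e1, e2, e3⟩ : y' = y ∧ x' = x ∧ d' = d),
              if_pos (show (pvEnc M y x d).toNat = (pvEnc M y' x' d').toNat by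
                rw [e1, e2, e3]),
              if_pos (show (pvEnc M y x d).toNat < seen.length by omega)]
            simp
          · have hne2 : pvEnc M y x d ≠ pvEnc M y' x' d' := by
              intro hcontra
              obtain ⟨e1, e2, e3⟩ := pvEnc_inj N M y x d y' x' d' hinr hin' hcontra
              exact he ⟨e1.symm, e2.symm, e3.symm⟩
            rw [if_neg he,
              if_neg (show ¬ (pvEnc M y x d).toNat = (pvEnc M y' x' d').toNat by omega),
              hcorr y' x' d' hin', PySem.List.pyGet?_of_nonneg _ hbnd'.1]
        · intro p hp'
          rcases List.mem_append.mp hp' with hold | hnew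
          · exact hcand p hold
          · simp at hnew; subst hnew; exact hinr
        · intro p hinp
          by_cases hpe : p = (y, x, d)
          · subst hpe
            rw [PySem.Dict.get?_insert_self,
              PySem.List.index?_append_singleton_self cand _ hm]
            simp [hsize]
          · have hne2 : pvEnc M p.1 p.2.1 p.2.2 ≠ pvEnc M y x d := by
              intro hcontra
              obtain ⟨e1, e2, e3⟩ := pvEnc_inj N M p.1 p.2.1 p.2.2 y x d hinp hinr hcontra
              apply hpe
              obtain ⟨a, b, c⟩ := p
              simp only [Prod.mk.injEq]
              exact ⟨e1, e2, e3⟩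
            rw [PySem.Dict.get?_insert_of_ne _ _ hne2, hpath p hinp]
            by_cases hmem : p ∈ cand
            · rw [PySem.List.index?_append_of_mem _ hmem]
            · rw [(PySem.List.index?_eq_none_iff _ _).mpr hmem,
                (PySem.List.index?_eq_none_iff _ _).mpr (by simp [hmem, hpe])]
        · rw [PySem.Dict.size_insert, hcontains]
          simp [hsize]
        · intro p hp'
          rcases List.mem_append.mp hp' with hold | hnew
          · rw [pvGet3_set3 N M visit hshape y x d p.1 p.2.1 p.2.2 hinr (hcand p hold)]
            split_ifs with hc
            · rfl
            · exact hmark p hold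
          · simp at hnew; subst hnew
            rw [pvGet3_set3 N M visit hshape y x d y x d hinr hinr]
            simp

-- main unconditional equality of the two ports
lemma pvSolution_eq (grid : List String) : solution grid = solution_alt grid := by
  simp only [solution, solution_alt]
  set NI : Int := (grid.length : Int) with hNI
  set MI : Int := PySem.Str.len ((PySem.List.pyGet? grid 0).getD "") with hMI
  have hN0 : 0 ≤ NI := by rw [hNI]; positivity
  have hM0 : 0 ≤ MI := by rw [hMI, PySem.Str.len_eq]; positivity
  have hS : (4 * NI * MI).toNat = NI.toNat * (MI.toNat * 4) := by
    have h4 : (4 : Int) * NI * MI = ((NI.toNat * (MI.toNat * 4) : Nat) : Int) := by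
      push_cast [Int.toNat_of_nonneg hN0, Int.toNat_of_nonneg hM0]
      ring
    rw [h4, Int.toNat_natCast]
  rw [PySem.List.pyRange_one 0 NI, PySem.List.pyRange_one 0 MI,
    PySem.List.pyRange_one 0 4, PySem.List.pyRange_one 0 (4 * NI * MI)]
  simp only [List.foldl_map, sub_zero, zero_add, show ((4 : Int)).toNat = 4 from rfl]
  rw [hS]
  simp only [pvFoldlRangeMul]
  have hinit : pvRel NI MI
      (List.replicate 4 (List.replicate NI.toNat (List.replicate MI.toNat false)))
      (List.replicate (NI.toNat * (MI.toNat * 4)) false) := by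
    refine ⟨⟨by simp, ?_⟩, by simp [List.length_replicate, hS], ?_⟩
    · intro pl hpl
      have hpl' := List.eq_of_mem_replicate hpl
      subst hpl'
      refine ⟨by simp, ?_⟩
      intro row hrow
      have hrow' := List.eq_of_mem_replicate hrow
      subst hrow'
      simp
    · intro y x d hin
      obtain ⟨hy0, hyN, hx0, hxM, hd0, hd4⟩ := hin
      have hbnd := pvEnc_bounds NI MI y x d ⟨hy0, hyN, hx0, hxM, hd0, hd4⟩
      rw [pvGet3_unfold _ _ _ _ hd0 hy0 hx0, PySem.List.pyGet?_of_nonneg _ hbnd.1]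
      by_cases h1 : d.toNat < 4 <;> by_cases h2 : y.toNat < NI.toNat <;>
        by_cases h3 : x.toNat < MI.toNat <;>
        by_cases h4 : (pvEnc MI y x d).toNat < NI.toNat * (MI.toNat * 4) <;>
        simp only [List.getElem?_replicate, h1, h2, h3, h4, if_true, if_false,
          Option.getD_some, Option.getD_none, List.getElem?_nil]
  refine congrArg (fun l => PySem.List.sorted l (fun v : Int => v))
    (pvFoldlRel
      (fun (a : List (List (List Bool)) × List Int) (b : List Bool × List Int) =>
        pvRel NI MI a.1 b.1 ∧ a.2 = b.2)
      _ _ (List.range NI.toNat) _ _ ⟨hinit, rfl⟩ ?_).2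
  · intro s t i hi hR
    refine pvFoldlRel
      (fun (a : List (List (List Bool)) × List Int) (b : List Bool × List Int) =>
        pvRel NI MI a.1 b.1 ∧ a.2 = b.2) _ _ (List.range MI.toNat) s t hR ?_
    intro s t j hj hR
    refine pvFoldlRel
      (fun (a : List (List (List Bool)) × List Int) (b : List Bool × List Int) =>
        pvRel NI MI a.1 b.1 ∧ a.2 = b.2) _ _ (List.range 4) s t hR ?_
    intro s t k hk hR
    have hi' : i < NI.toNat := List.mem_range.mp hi
    have hj' : j < MI.toNat := List.mem_range.mp hj
    have hk' : k < 4 := List.mem_range.mp hk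
    have hN1 : 0 < NI := by omega
    have hM1 : 0 < MI := by omega
    have hin : pvInr NI MI (i : Int) (j : Int) (k : Int) := by
      unfold pvInr
      refine ⟨by positivity, by omega, by positivity, by omega, by positivity, by omega⟩
    have hMM : ((MI.toNat : Int)) = MI := Int.toNat_of_nonneg hM0
    have henc : ((i * (MI.toNat * 4) + (j * 4 + k) : Nat) : Int)
        = pvEnc MI (i : Int) (j : Int) (k : Int) := by
      unfold pvEnc
      push_cast [hMM]
      ring
    rw [henc]
    have hfuel : NI.toNat * (MI.toNat * 4) = 4 * NI.toNat * MI.toNat := by ring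
    rw [hfuel]
    obtain ⟨hRel, hAns⟩ := hR
    obtain ⟨hshape, hlen, hcorr⟩ := hRel
    have hguard : (PySem.List.pyGet? t.1 (pvEnc MI (i : Int) (j : Int) (k : Int))).getD false
        = pvGet3 s.1 (k : Int) (i : Int) (j : Int) := (hcorr _ _ _ hin).symm
    rw [hguard]
    by_cases hg : pvGet3 s.1 (k : Int) (i : Int) (j : Int) = false
    · rw [if_pos hg, if_pos hg]
      have hw := pvWalk_eq grid NI MI hN1 hM1 (4 * NI.toNat * MI.toNat + 1)
        (i : Int) (j : Int) (k : Int) [] PySem.Dict.empty s.1 t.1 hin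
        ⟨hshape, hlen, hcorr⟩ (by intro p hp; simp at hp)
        (by
          intro p hinp
          rw [PySem.Dict.get?_empty]
          rw [(PySem.List.index?_eq_none_iff _ _).mpr (by simp)]
          rfl)
        (by simp [PySem.Dict.size, PySem.Dict.empty]) (by intro p hp; simp at hp)
      refine ⟨hw.2, ?_⟩
      rw [hw.1]
      by_cases hr : (pvBacktrak (4 * NI.toNat * MI.toNat + 1) (i : Int) (j : Int) (k : Int)
          grid [] NI MI s.1).1 = 0
      · simp [pvResOpt, hr, hAns]
      · simp [pvResOpt, hr, hAns]
    · rw [if_neg hg, if_neg hg]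
      exact ⟨⟨hshape, hlen, hcorr⟩, hAns⟩

-- ===== VERDICT (by name: the statement is the Claim_ definition above) =====
theorem solution_spec : Claim_equal_solution := by
  intro grid _ _
  exact pvSolution_eq grid
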